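-- pv_equiv track=rewrite | github.com/here0009/LeetCode | Ohters/LCP28_采购方案.py | purchasePlans
-- ===== SOURCE A (Python) =====
-- from typing import List
-- from typing import List
--
-- def purchasePlans(nums: List[int], target: int) -> int:
--     nums = sorted(nums)
--     M = 10**9 + 7
--     res = 0
--     left, right = 0, len(nums) - 1
--     while left < right:
--         while right > left and nums[right] + nums[left] > target:
--             right -= 1
--         res += right - left
--         res = res % M
--         left += 1
--     return res
-- ===== SOURCE B (Python) =====
-- def purchasePlans(nums, target):
--     nums = sorted(nums)
--     n = len(nums)
--     res = 0
--     for i in range(n):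
--         # bisect_right(nums, target - nums[i]) by hand (A's module imports no bisect)
--         x = target - nums[i]
--         lo, hi = 0, n
--         while lo < hi:
--             mid = (lo + hi) // 2
--             if nums[mid] <= x:
--                 lo = mid + 1
--             else:
--                 hi = mid
--         res += max(0, lo - i - 1)
--     return res % (10**9 + 7)
-- ===== Notes on version B (the rewrite author's own statement) =====
-- stated objective: alternative
-- what changed: Replaces A's coupled two-pointer sweep (right pointer shared across iterations of left) with an independent hand-written bisect_right binary search per element, counting max(0, bisect_right(nums, target - nums[i]) - i - 1) partners for each i.
import Mathlib
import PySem

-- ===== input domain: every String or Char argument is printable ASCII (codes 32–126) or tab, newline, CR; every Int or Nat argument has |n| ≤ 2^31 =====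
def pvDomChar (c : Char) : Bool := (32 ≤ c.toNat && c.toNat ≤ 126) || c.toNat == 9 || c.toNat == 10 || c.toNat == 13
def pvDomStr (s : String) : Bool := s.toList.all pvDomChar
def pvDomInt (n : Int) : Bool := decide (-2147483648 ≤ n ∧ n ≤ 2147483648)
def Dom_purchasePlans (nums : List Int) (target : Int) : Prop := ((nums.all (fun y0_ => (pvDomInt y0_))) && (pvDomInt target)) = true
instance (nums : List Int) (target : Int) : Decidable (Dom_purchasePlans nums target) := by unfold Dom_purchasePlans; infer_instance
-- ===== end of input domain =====

-- B replaces A's coupled two-pointer sweep by an independent hand-written binary search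
-- (bisect_right) per element: an alternative algorithm, same result.

-- ===== PORT A =====
-- shared index helper: every access in both ports happens at an in-range index, where pyGetD is exact
def pvIdx (s : List Int) (i : Int) : Int := PySem.List.pyGetD s i 0

-- inner loop: while right > left and nums[right] + nums[left] > target: right -= 1
def pvInnerA (s : List Int) (target left right : Int) : Int :=
  if h : right > left ∧ pvIdx s right + pvIdx s left > target then
    pvInnerA s target left (right - 1)
  else right
termination_by (right - left).toNat
decreasing_by omega

-- cited by pvOuterA's termination proof
lemma pvInnerA_le (s : List Int) (target : Int) : ∀ n : ℕ, ∀ left right : Int,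
    (right - left).toNat = n → left ≤ right →
    left ≤ pvInnerA s target left right ∧ pvInnerA s target left right ≤ right := by
  intro n
  induction n using Nat.strong_induction_on with
  | _ n ih =>
    intro left right hn hlr
    rw [pvInnerA]
    split
    · rename_i h
      have := ih ((right - 1) - left).toNat (by omega) left (right - 1) rfl (by omega)
      omega
    · omega

-- outer loop of A: while left < right: (inner); res += right - left; res %= M; left += 1
def pvOuterA (s : List Int) (target left right res : Int) : Int :=
  if h : left < right then
    pvOuterA s target (left + 1) (pvInnerA s target left right)
      ((res + (pvInnerA s target left right - left)) % 1000000007)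
  else res
termination_by (right - left).toNat
decreasing_by
  have := pvInnerA_le s target (right - left).toNat left right rfl (le_of_lt h)
  omega

def purchasePlans (nums : List Int) (target : Int) : Int :=
  let s := PySem.List.sorted nums (fun x => x) false
  pvOuterA s target 0 ((s.length : Int) - 1) 0

-- ===== PORT B =====
-- hand-written bisect_right: while lo < hi: mid = (lo+hi)//2; if nums[mid] <= x: lo = mid+1 else hi = mid
def pvBisR (s : List Int) (x lo hi : Int) : Int :=
  if h : lo < hi then
    if pvIdx s (PySem.Int.floordiv (lo + hi) 2) ≤ x then
      pvBisR s x (PySem.Int.floordiv (lo + hi) 2 + 1) hi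
    else
      pvBisR s x lo (PySem.Int.floordiv (lo + hi) 2)
  else lo
termination_by (hi - lo).toNat
decreasing_by
  · have := PySem.Int.floordiv_two_mid_bounds (le_of_lt h)
    omega
  · have : PySem.Int.floordiv (lo + hi) 2 < hi :=
      (PySem.Int.floordiv_lt_iff_lt_mul (by norm_num)).mpr (by omega)
    omega

-- for i in range(n): res += max(0, bisect_right(nums, target - nums[i]) - i - 1); return res % (10**9+7)
def purchasePlans_alt (nums : List Int) (target : Int) : Int :=
  let s := PySem.List.sorted nums (fun x => x) false
  ((List.range s.length).foldl
    (fun res (i : ℕ) =>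
      res + max 0 (pvBisR s (target - pvIdx s (i : Int)) 0 (s.length : Int) - (i : Int) - 1))
    0) % 1000000007

-- ===== PRECONDITION & SPEC =====
def Spec_purchasePlans (nums : List Int) (target : Int) (out : Int) : Prop := out = purchasePlans_alt nums target
instance (nums : List Int) (target : Int) (out : Int) : Decidable (Spec_purchasePlans nums target out) := by unfold Spec_purchasePlans; infer_instance

-- ===== CLAIM (what is proved, stated in full; the proofs are below) =====
def Claim_equal_purchasePlans : Prop := ∀ (nums : List Int) (target : Int), Dom_purchasePlans nums target → Spec_purchasePlans nums target (purchasePlans nums target)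

-- ===== LEMMAS AND PROOFS =====

-- pvCnt s target i = number of partners j > i with s[i] + s[j] ≤ target; pvTot = all such pairs
def pvCnt (s : List Int) (target : Int) (i : ℕ) : ℕ :=
  ((Finset.range s.length).filter (fun j => i < j ∧ pvIdx s (i : Int) + pvIdx s (j : Int) ≤ target)).card

def pvTot (s : List Int) (target : Int) : ℕ := ∑ i ∈ Finset.range s.length, pvCnt s target i

def pvSortedP (s : List Int) : Prop :=
  ∀ p q : ℕ, p ≤ q → q < s.length → pvIdx s (p : Int) ≤ pvIdx s (q : Int)

lemma pvSortedP_sorted (nums : List Int) : pvSortedP (PySem.List.sorted nums (fun x => x) false) := by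
  intro p q hpq hq
  have hlen : q < (PySem.List.sorted nums (fun x => x) false).length := by
    simpa [PySem.List.length_sorted] using hq
  have hmono := PySem.List.sorted_id_getElem_mono nums hpq hlen
  rw [pvIdx, pvIdx,
    PySem.List.pyGetD_eq_getElem _ _ (by positivity) (by exact_mod_cast (lt_of_le_of_lt hpq hq)),
    PySem.List.pyGetD_eq_getElem _ _ (by positivity) (by exact_mod_cast hq)]
  simpa using hmono

lemma pvMono {s : List Int} (hs : pvSortedP s) {i j : Int} (h0 : 0 ≤ i) (hij : i ≤ j)
    (hj : j < (s.length : Int)) : pvIdx s i ≤ pvIdx s j := by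
  have := hs i.toNat j.toNat (by omega) (by omega)
  rwa [Int.toNat_of_nonneg h0, Int.toNat_of_nonneg (by omega)] at this

lemma pvInnerA_spec (s : List Int) (target : Int) :
    ∀ n : ℕ, ∀ left right : Int, (right - left).toNat = n →
    0 ≤ left → right < (s.length : Int) → left ≤ right →
    (∀ j : Int, right < j → j < (s.length : Int) → target < pvIdx s left + pvIdx s j) →
    left ≤ pvInnerA s target left right ∧ pvInnerA s target left right ≤ right ∧
    (∀ j : Int, pvInnerA s target left right < j → j < (s.length : Int) →
      target < pvIdx s left + pvIdx s j) ∧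
    (left < pvInnerA s target left right →
      pvIdx s left + pvIdx s (pvInnerA s target left right) ≤ target) := by
  intro n
  induction n using Nat.strong_induction_on with
  | _ n ih =>
    intro left right hn h0 hrlen hlr hbad
    rw [pvInnerA]
    split
    · rename_i h
      have hrec := ih ((right - 1) - left).toNat (by omega) left (right - 1) rfl h0
        (by omega) (by omega)
        (by
          intro j hj1 hj2
          rcases eq_or_lt_of_le (show right ≤ j by omega) with heq | hlt
          · subst heq; linarith [h.2]
          · exact hbad j hlt hj2)
      exact ⟨hrec.1, by omega, hrec.2.2⟩
    · rename_i h
      push Not at h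
      refine ⟨hlr, le_refl _, hbad, ?_⟩
      intro hlt
      linarith [h hlt]

lemma pvCntA (s : List Int) (target : Int) (hs : pvSortedP s) (left r : Int)
    (h0 : 0 ≤ left) (hr : r < (s.length : Int)) (hlr : left ≤ r)
    (hbad : ∀ j : Int, r < j → j < (s.length : Int) → target < pvIdx s left + pvIdx s j)
    (hgood : left < r → pvIdx s left + pvIdx s r ≤ target) :
    (pvCnt s target left.toNat : Int) = r - left := by
  have hfe : (Finset.range s.length).filter
      (fun j => left.toNat < j ∧ pvIdx s (left.toNat : Int) + pvIdx s (j : Int) ≤ target)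
      = Finset.Ico (left.toNat + 1) (r.toNat + 1) := by
    ext j
    simp only [Finset.mem_filter, Finset.mem_range, Finset.mem_Ico]
    rw [Int.toNat_of_nonneg h0]
    constructor
    · rintro ⟨hjlen, hij, hsum⟩
      refine ⟨by omega, ?_⟩
      by_contra hcon
      have hjr : r < (j : Int) := by omega
      exact absurd hsum (not_le.mpr (hbad _ hjr (by exact_mod_cast hjlen)))
    · rintro ⟨h1, h2⟩
      have hjr : (j : Int) ≤ r := by omega
      have hjlen : (j : Int) < (s.length : Int) := lt_of_le_of_lt hjr hr
      have hlj : left < (j : Int) := by omega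
      refine ⟨by exact_mod_cast hjlen, by omega, ?_⟩
      have hmon : pvIdx s (j : Int) ≤ pvIdx s r := pvMono hs (by omega) hjr hr
      have := hgood (lt_of_lt_of_le hlj hjr)
      linarith
  rw [pvCnt, hfe, Nat.card_Ico]
  omega

lemma pvOuterA_spec (s : List Int) (target : Int) (hs : pvSortedP s) :
    ∀ n : ℕ, ∀ left right res : Int, (right - left).toNat = n →
    0 ≤ left → left ≤ right + 1 → right < (s.length : Int) →
    (left < (s.length : Int) → ∀ j : Int, right < j → j < (s.length : Int) →
      target < pvIdx s left + pvIdx s j) →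
    res = (∑ i ∈ Finset.range left.toNat, (pvCnt s target i : Int)) % 1000000007 →
    pvOuterA s target left right res = (pvTot s target : Int) % 1000000007 := by
  intro n
  induction n using Nat.strong_induction_on with
  | _ n ih =>
    intro left right res hn h0 hlr1 hrlen hbad hres
    rw [pvOuterA]
    split
    · rename_i h
      have hllen : left < (s.length : Int) := lt_of_lt_of_le h (by omega)
      have hspec := pvInnerA_spec s target (right - left).toNat left right rfl h0 hrlen
        (le_of_lt h) (hbad hllen)
      set r := pvInnerA s target left right with hr
      have hcnt : (pvCnt s target left.toNat : Int) = r - left :=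
        pvCntA s target hs left r h0 (by omega) hspec.1 hspec.2.2.1 hspec.2.2.2
      apply ih ((r - (left + 1)).toNat) (by omega) (left + 1) r _ rfl (by omega) (by omega)
        (by omega)
      · intro hl1len j hj1 hj2
        have h1 : pvIdx s left ≤ pvIdx s (left + 1) := pvMono hs h0 (by omega) hl1len
        have := hspec.2.2.1 j hj1 hj2
        linarith
      · have hlt1 : (left + 1).toNat = left.toNat + 1 := by omega
        rw [hlt1, Finset.sum_range_succ, hcnt, hres]
        conv_rhs => rw [Int.add_emod]
        conv_lhs => rw [Int.add_emod, Int.emod_emod_of_dvd _ dvd_rfl]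
    · rename_i h
      rw [hres, pvTot]
      have hlen : left.toNat ≤ s.length := by omega
      have hz : ∑ i ∈ Finset.Ico left.toNat s.length, pvCnt s target i = 0 := by
        apply Finset.sum_eq_zero
        intro i hi
        simp only [Finset.mem_Ico] at hi
        rw [pvCnt, Finset.card_eq_zero]
        apply Finset.filter_eq_empty_iff.mpr
        intro j hj
        simp only [Finset.mem_range] at hj
        rintro ⟨hij, hsum⟩
        have hllen : left < (s.length : Int) := by omega
        have hjr : right < (j : Int) := by omega
        have hb := hbad hllen (j : Int) hjr (by exact_mod_cast hj)
        have hm : pvIdx s left ≤ pvIdx s (i : Int) :=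
          pvMono hs (i := left) (j := (i : Int)) h0 (by omega) (by omega)
        linarith
      have hsplit : ∑ i ∈ Finset.range s.length, pvCnt s target i
          = ∑ i ∈ Finset.range left.toNat, pvCnt s target i := by
        rw [Finset.range_eq_Ico,
          ← Finset.sum_Ico_consecutive _ (Nat.zero_le left.toNat) hlen, hz,
          ← Finset.range_eq_Ico, Nat.add_zero]
      rw [hsplit]
      push_cast
      rfl

lemma purchasePlans_eq_tot (nums : List Int) (target : Int) :
    purchasePlans nums target
      = (pvTot (PySem.List.sorted nums (fun x => x) false) target : Int) % 1000000007 := by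
  rw [purchasePlans]
  apply pvOuterA_spec _ _ (pvSortedP_sorted nums) ((((PySem.List.sorted nums (fun x => x) false).length : Int) - 1) - 0).toNat
    0 _ 0 rfl le_rfl (by omega) (by omega)
  · intro _ j hj1 hj2
    omega
  · simp

lemma pvBisR_spec (s : List Int) (x : Int) (hs : pvSortedP s) :
    ∀ n : ℕ, ∀ lo hi : Int, (hi - lo).toNat = n →
    0 ≤ lo → lo ≤ hi → hi ≤ (s.length : Int) →
    (∀ k : Int, 0 ≤ k → k < lo → pvIdx s k ≤ x) →
    (∀ k : Int, hi ≤ k → k < (s.length : Int) → x < pvIdx s k) →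
    lo ≤ pvBisR s x lo hi ∧ pvBisR s x lo hi ≤ hi ∧
    (∀ k : Int, 0 ≤ k → k < pvBisR s x lo hi → pvIdx s k ≤ x) ∧
    (∀ k : Int, pvBisR s x lo hi ≤ k → k < (s.length : Int) → x < pvIdx s k) := by
  intro n
  induction n using Nat.strong_induction_on with
  | _ n ih =>
    intro lo hi hn h0 hlohi hhil hlow hhigh
    rw [pvBisR]
    split
    · rename_i h
      have hmid := PySem.Int.floordiv_two_mid_bounds (le_of_lt h)
      have hmidlt : PySem.Int.floordiv (lo + hi) 2 < hi :=
        (PySem.Int.floordiv_lt_iff_lt_mul (by norm_num)).mpr (by omega)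
      set mid := PySem.Int.floordiv (lo + hi) 2 with hmd
      split
      · rename_i hle
        have hrec := ih ((hi - (mid + 1)).toNat) (by omega) (mid + 1) hi rfl (by omega)
          (by omega) hhil
          (by
            intro k hk0 hkm
            rcases lt_or_ge k lo with hkl | hkl
            · exact hlow k hk0 hkl
            · have : pvIdx s k ≤ pvIdx s mid := pvMono hs hk0 (by omega) (by omega)
              linarith)
          hhigh
        exact ⟨by omega, by omega, hrec.2.2⟩
      · rename_i hgt
        push Not at hgt
        have hrec := ih ((mid - lo).toNat) (by omega) lo mid rfl h0 (by omega) (by omega)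
          hlow
          (by
            intro k hkm hkl
            have : pvIdx s mid ≤ pvIdx s k := pvMono hs (by omega) hkm (by omega)
            linarith)
        exact ⟨hrec.1, by omega, hrec.2.2⟩
    · rename_i h
      refine ⟨le_refl _, hlohi, hlow, ?_⟩
      intro k hk1 hk2
      exact hhigh k (by omega) hk2

lemma pvCntB (s : List Int) (target : Int) (hs : pvSortedP s) (i : ℕ) (hi : i < s.length) :
    max 0 (pvBisR s (target - pvIdx s (i : Int)) 0 (s.length : Int) - (i : Int) - 1)
      = (pvCnt s target i : Int) := by
  have hspec := pvBisR_spec s (target - pvIdx s (i : Int)) hs ((s.length : Int) - 0).toNat 0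
    (s.length : Int) rfl le_rfl (by omega) le_rfl (by omega) (by omega)
  set r := pvBisR s (target - pvIdx s (i : Int)) 0 (s.length : Int) with hrd
  have hfe : (Finset.range s.length).filter
      (fun j => i < j ∧ pvIdx s (i : Int) + pvIdx s (j : Int) ≤ target)
      = Finset.Ico (i + 1) r.toNat := by
    ext j
    simp only [Finset.mem_filter, Finset.mem_range, Finset.mem_Ico]
    constructor
    · rintro ⟨hjlen, hij, hsum⟩
      refine ⟨by omega, ?_⟩
      by_contra hcon
      have : r ≤ (j : Int) := by omega
      have := hspec.2.2.2 (j : Int) this (by exact_mod_cast hjlen)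
      linarith
    · rintro ⟨h1, h2⟩
      have hjr : (j : Int) < r := by omega
      have hjlen : (j : Int) < (s.length : Int) := lt_of_lt_of_le hjr hspec.2.1
      have := hspec.2.2.1 (j : Int) (by omega) hjr
      exact ⟨by exact_mod_cast hjlen, by omega, by linarith⟩
  rw [pvCnt, hfe, Nat.card_Ico]
  omega

lemma purchasePlans_alt_eq_tot (nums : List Int) (target : Int) :
    purchasePlans_alt nums target
      = (pvTot (PySem.List.sorted nums (fun x => x) false) target : Int) % 1000000007 := by
  rw [purchasePlans_alt]
  set s := PySem.List.sorted nums (fun x => x) false with hsd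
  have hs := pvSortedP_sorted nums
  rw [PySem.List.foldl_add]
  congr 1
  have hmap : ((List.range s.length).map
      (fun (i : ℕ) => max 0 (pvBisR s (target - pvIdx s (i : Int)) 0 (s.length : Int) - (i : Int) - 1))).sum
      = ∑ i ∈ Finset.range s.length,
        max 0 (pvBisR s (target - pvIdx s (i : Int)) 0 (s.length : Int) - (i : Int) - 1) := rfl
  rw [zero_add, hmap, pvTot]
  push_cast
  apply Finset.sum_congr rfl
  intro i hi
  exact pvCntB s target hs i (Finset.mem_range.mp hi)

-- ===== VERDICT (by name: the statement is the Claim_ definition above) =====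
theorem purchasePlans_spec : Claim_equal_purchasePlans := by
  intro nums target _
  unfold Spec_purchasePlans
  rw [purchasePlans_eq_tot, purchasePlans_alt_eq_tot]
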